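-- pv_equiv track=rewrite | github.com/tikalk/agentic-sdlc-spec-kit | src/specify_cli/cli_customization.py | compute_skill_output_name
-- ===== SOURCE A (Python) =====
-- FORK_COMMAND_NAMESPACES = frozenset({"adlc", "spec"})
--
-- def compute_skill_output_name(cmd_name: str, agent_config: dict) -> str:
--     """
--     Compute the on-disk skill name for an agent with fork-specific handling.
--
--     This function handles the fork's command naming conventions where:
--     - Commands with "adlc." prefix should become /adlc-{command} (not /speckit-adlc-{command})
--     - Commands with "spec." alias prefix should become /spec-{command} (not /speckit-spec-{command})
--     - Extension commands like "speckit.test-ext.hello" still get the "speckit-" prefix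
--
--     Args:
--         cmd_name: The command name (e.g., "adlc.spec.constitution", "spec.constitution", "speckit.test-ext.hello")
--         agent_config: Agent configuration dict
--
--     Returns:
--         The output name for the skill file (e.g., "adlc-spec-constitution", "spec-constitution", or "speckit-test-ext-hello")
--     """
--     if agent_config.get("extension") != "/SKILL.md":
--         return cmd_name
--
--     # Check if command starts with a fork-specific namespace
--     # These should NOT get the "speckit-" prefix
--     for namespace in FORK_COMMAND_NAMESPACES:
--         prefix = f"{namespace}."
--         if cmd_name.startswith(prefix):
--             # Replace dots with dashes directly (e.g., "adlc.spec.constitution" -> "adlc-spec-constitution")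
--             return cmd_name.replace(".", "-")
--
--     # For non-fork commands (e.g., speckit.test-ext.hello), use upstream behavior
--     # Strip "speckit." prefix and add "speckit-" back
--     if cmd_name.startswith("speckit."):
--         short_name = cmd_name[len("speckit.") :]
--         return f"speckit-{short_name.replace('.', '-')}"
--
--     # Fallback for any other commands (shouldn't normally hit this)
--     return cmd_name.replace(".", "-")
-- ===== SOURCE B (Python) =====
-- def compute_skill_output_name(cmd_name: str, agent_config: dict) -> str:
--     # Every /SKILL.md path in the original collapses to the same dot-to-dash rewrite.
--     if agent_config.get("extension") != "/SKILL.md":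
--         return cmd_name
--     return cmd_name.replace(".", "-")
-- ===== Notes on version B (the rewrite author's own statement) =====
-- stated objective: simpler
-- what changed: All /SKILL.md branches of A (fork-namespace loop, speckit strip-and-reprefix, fallback) return exactly cmd_name.replace('.', '-'), so B drops the frozenset, the prefix loop and the speckit branch and returns the replace unconditionally after the extension guard.
import Mathlib
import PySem

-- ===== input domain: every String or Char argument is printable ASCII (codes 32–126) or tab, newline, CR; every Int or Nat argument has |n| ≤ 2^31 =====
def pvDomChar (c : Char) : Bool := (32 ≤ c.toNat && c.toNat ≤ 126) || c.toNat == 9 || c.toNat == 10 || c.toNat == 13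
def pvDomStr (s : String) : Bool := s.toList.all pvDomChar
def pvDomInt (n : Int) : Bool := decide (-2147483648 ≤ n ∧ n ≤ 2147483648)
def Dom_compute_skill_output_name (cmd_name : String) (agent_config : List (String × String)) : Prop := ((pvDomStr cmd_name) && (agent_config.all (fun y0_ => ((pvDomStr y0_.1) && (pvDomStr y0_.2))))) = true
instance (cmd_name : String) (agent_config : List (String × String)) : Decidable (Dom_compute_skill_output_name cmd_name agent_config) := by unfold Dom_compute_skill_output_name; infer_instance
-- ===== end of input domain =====

-- B keeps only the extension guard and returns cmd_name.replace(".", "-") unconditionally (all /SKILL.md branches of A coincide); objective: simpler.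


-- ===== PORT A =====
-- FORK_COMMAND_NAMESPACES = frozenset({"adlc", "spec"}) : iterated as a list (any
-- order gives the same result here, since every match returns the same value).
def pvForkNamespaces : List String := ["adlc", "spec"]

def compute_skill_output_name (cmd_name : String) (agent_config : List (String × String)) : String :=
  if (PySem.Dict.get? (PySem.Dict.mk agent_config) "extension") ≠ some "/SKILL.md" then
    cmd_name
  else
    -- for namespace in FORK_COMMAND_NAMESPACES: if cmd_name.startswith(f"{namespace}."): return …
    match pvForkNamespaces.find? (fun ns => PySem.Str.startswith cmd_name (ns ++ ".")) with
    | some _ => PySem.Str.replace cmd_name "." "-"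
    | none =>
      if PySem.Str.startswith cmd_name "speckit." then
        -- short_name = cmd_name[len("speckit."):]
        "speckit-" ++ PySem.Str.replace (PySem.Str.slice cmd_name (some 8) none) "." "-"
      else
        PySem.Str.replace cmd_name "." "-"

-- ===== PORT B =====
def compute_skill_output_name_alt (cmd_name : String) (agent_config : List (String × String)) : String :=
  if (PySem.Dict.get? (PySem.Dict.mk agent_config) "extension") ≠ some "/SKILL.md" then
    cmd_name
  else
    PySem.Str.replace cmd_name "." "-"
-- ===== PRECONDITION & SPEC =====
def Spec_compute_skill_output_name (cmd_name : String) (agent_config : List (String × String)) (out : String) : Prop := out = compute_skill_output_name_alt cmd_name agent_config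
instance (cmd_name : String) (agent_config : List (String × String)) (out : String) : Decidable (Spec_compute_skill_output_name cmd_name agent_config out) := by unfold Spec_compute_skill_output_name; infer_instance

-- ===== CLAIM (what is proved, stated in full; the proofs are below) =====
def Claim_equal_compute_skill_output_name : Prop := ∀ (cmd_name : String) (agent_config : List (String × String)), Dom_compute_skill_output_name cmd_name agent_config → Spec_compute_skill_output_name cmd_name agent_config (compute_skill_output_name cmd_name agent_config)

-- ===== LEMMAS AND PROOFS =====

-- single-char replace is a flatMap over the characters
theorem pv_replace_go_single (o : Char) (new : List Char) :
    ∀ (l : List Char) (fuel : Nat) (acc : List Char), l.length ≤ fuel →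
      PySem.Chars.replace.go [o] new fuel l acc
        = acc.reverse ++ l.flatMap (fun c => if c = o then new else [c]) := by
  intro l
  induction l with
  | nil =>
    intro fuel acc _
    cases fuel <;> simp [PySem.Chars.replace.go]
  | cons c t ih =>
    intro fuel acc h
    cases fuel with
    | zero => simp at h
    | succ fuel =>
      have ht : t.length ≤ fuel := by simpa using h
      by_cases hc : c = o
      · subst hc
        simp [PySem.Chars.replace.go, List.isPrefixOf, ih fuel _ ht]
      · have hp : [o].isPrefixOf (c :: t) = false := by
          simp [List.isPrefixOf]
          exact fun h' => hc h'.symm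
        simp [PySem.Chars.replace.go, hp, ih fuel _ ht, hc]

theorem pv_replace_single (s : List Char) (o : Char) (new : List Char) :
    PySem.Chars.replace s [o] new = s.flatMap (fun c => if c = o then new else [c]) := by
  simp [PySem.Chars.replace, pv_replace_go_single o new s s.length [] le_rfl]

theorem pv_speckit_branch (s : String) (h : PySem.Str.startswith s "speckit." = true) :
    "speckit-" ++ PySem.Str.replace (PySem.Str.slice s (some 8) none) "." "-"
      = PySem.Str.replace s "." "-" := by
  obtain ⟨t, ht⟩ : "speckit.".toList <+: s.toList := by
    have := PySem.Str.startswith_eq s "speckit."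
    rw [this] at h
    exact (PySem.Chars.startswith_iff _ _).mp h
  have hdrop : s.toList.drop 8 = t := by
    rw [← ht]; rfl
  have hsl : (PySem.Str.slice s (some 8) none).toList = t := by
    simp [PySem.Str.slice, PySem.Chars.slice_eq_listSlice, PySem.List.slice_from, hdrop]
  apply String.toList_inj.mp
  simp only [PySem.Str.replace]
  rw [String.toList_append, String.toList_ofList, String.toList_ofList, hsl, ← ht]
  have hdot : (".".toList : List Char) = ['.'] := rfl
  rw [hdot, pv_replace_single, pv_replace_single, List.flatMap_append]
  simp

-- ===== VERDICT (by name: the statement is the Claim_ definition above) =====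
theorem compute_skill_output_name_spec : Claim_equal_compute_skill_output_name := by
  intro cmd_name agent_config _
  unfold Spec_compute_skill_output_name compute_skill_output_name compute_skill_output_name_alt
  by_cases hext : (PySem.Dict.get? (PySem.Dict.mk agent_config) "extension") ≠ some "/SKILL.md"
  · simp [hext]
  · simp only [hext, if_false]
    cases hfind : pvForkNamespaces.find? (fun ns => PySem.Str.startswith cmd_name (ns ++ ".")) with
    | some ns => simp
    | none =>
      by_cases hsp : PySem.Str.startswith cmd_name "speckit." = true
      · simp only [hsp, if_true]
        exact pv_speckit_branch cmd_name hsp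
      · have hsp' : PySem.Str.startswith cmd_name "speckit." = false := by
          simpa using hsp
        simp only [PySem.Str.startswith] at hsp'
        have hlit : ("speckit.".toList : List Char) = ['s','p','e','c','k','i','t','.'] := rfl
        rw [hlit] at hsp'
        simp [hsp']
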